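-- pv_equiv track=rewrite | github.com/MiixZ/PTC_sesiones | seson4/s4ejercicio03.py | max_min_lista
-- ===== SOURCE A (Python) =====
-- def max_min_lista(lista_a_comprobar):
--     """Devuelve el máximo y el mínimo de una lista, así como sus respectivas posiciones.
--     lista: list
--     return: int, int, int, int"""
--     maximo = lista_a_comprobar[0]
--     minimo = lista_a_comprobar[0]
--     posicion_maximo = 0
--     posicion_minimo = 0
--     for i in range(1, len(lista_a_comprobar)):
--         if lista_a_comprobar[i] > maximo:
--             maximo = lista_a_comprobar[i]
--             posicion_maximo = i
--         if lista_a_comprobar[i] < minimo: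
--             minimo = lista_a_comprobar[i]
--             posicion_minimo = i
--     return maximo, posicion_maximo, minimo, posicion_minimo
-- ===== SOURCE B (Python) =====
-- def max_min_lista(lista_a_comprobar):
--     """Devuelve el máximo y el mínimo de una lista, así como sus respectivas posiciones."""
--     maximo = max(lista_a_comprobar)
--     minimo = min(lista_a_comprobar)
--     return (maximo, lista_a_comprobar.index(maximo),
--             minimo, lista_a_comprobar.index(minimo))
-- ===== Notes on version B (the rewrite author's own statement) =====
-- stated objective: idiomatic
-- what changed: Replaces the hand-written index loop that tracks four running variables with the built-in max/min plus list.index (first occurrence matches A's strict-comparison tie-breaking).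
import Mathlib
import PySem

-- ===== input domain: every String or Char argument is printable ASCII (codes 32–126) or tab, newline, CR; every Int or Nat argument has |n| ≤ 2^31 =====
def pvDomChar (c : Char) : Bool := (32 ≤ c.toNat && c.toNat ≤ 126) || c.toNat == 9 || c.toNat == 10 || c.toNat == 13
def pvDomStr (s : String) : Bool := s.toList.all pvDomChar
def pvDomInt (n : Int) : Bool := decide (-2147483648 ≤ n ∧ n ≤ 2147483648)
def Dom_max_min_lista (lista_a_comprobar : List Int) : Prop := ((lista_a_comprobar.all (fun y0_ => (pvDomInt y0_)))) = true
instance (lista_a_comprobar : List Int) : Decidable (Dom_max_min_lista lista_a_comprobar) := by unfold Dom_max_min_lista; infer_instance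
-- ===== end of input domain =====

-- B replaces A's hand-written index loop by the idiomatic max/min + list.index; equal on all non-empty lists.

-- ===== PORT A =====
-- A's loop body: state (maximo, posicion_maximo, minimo, posicion_minimo), value v = lista[i], index i.
def pvStep (st : Int × Int × Int × Int) (v i : Int) : Int × Int × Int × Int :=
  let st1 := if v > st.1 then (v, i, st.2.2.1, st.2.2.2) else st
  if v < st1.2.2.1 then (st1.1, st1.2.1, v, i) else st1

-- Literal port: running max/min with positions, 'for i in range(1, len(lista))'.
def max_min_lista (lista_a_comprobar : List Int) : Int × Int × Int × Int :=
  let maximo := PySem.List.pyGetD lista_a_comprobar 0 0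
  let minimo := PySem.List.pyGetD lista_a_comprobar 0 0
  (PySem.List.pyRange 1 (lista_a_comprobar.length : Int) 1).foldl
    (fun st i => pvStep st (PySem.List.pyGetD lista_a_comprobar i 0) i)
    (maximo, 0, minimo, 0)

-- ===== PORT B =====
-- Port of Source B: max(lista), min(lista), list.index for the (first) positions.
def max_min_lista_alt (lista_a_comprobar : List Int) : Int × Int × Int × Int :=
  match PySem.List.max? lista_a_comprobar (fun x => x),
        PySem.List.min? lista_a_comprobar (fun x => x) with
  | some maximo, some minimo =>
      (maximo, (((PySem.List.index? lista_a_comprobar maximo).getD 0 : Nat) : Int),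
       minimo, (((PySem.List.index? lista_a_comprobar minimo).getD 0 : Nat) : Int))
  | _, _ => (0, 0, 0, 0)

-- ===== PRECONDITION & SPEC =====
-- Pre_ excludes only the empty list, on which A raises IndexError (and B raises ValueError).
def Pre_max_min_lista (lista_a_comprobar : List Int) : Prop := lista_a_comprobar ≠ []
instance (lista_a_comprobar : List Int) : Decidable (Pre_max_min_lista lista_a_comprobar) := by unfold Pre_max_min_lista; infer_instance
def pvWitness_max_min_lista : List Int := [3, -1, 3]

def Spec_max_min_lista (lista_a_comprobar : List Int) (out : Int × Int × Int × Int) : Prop := out = max_min_lista_alt lista_a_comprobar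
instance (lista_a_comprobar : List Int) (out : Int × Int × Int × Int) : Decidable (Spec_max_min_lista lista_a_comprobar out) := by unfold Spec_max_min_lista; infer_instance

-- ===== CLAIM (what is proved, stated in full; the proofs are below) =====
def Claim_equal_max_min_lista : Prop := ∀ (lista_a_comprobar : List Int), Dom_max_min_lista lista_a_comprobar → Pre_max_min_lista lista_a_comprobar → Spec_max_min_lista lista_a_comprobar (max_min_lista lista_a_comprobar)

-- ===== LEMMAS AND PROOFS =====

theorem pvA_single (x : Int) : max_min_lista [x] = (x, 0, x, 0) := by
  simp [max_min_lista, PySem.List.pyRange_one_eq_nil (le_refl (1 : Int))]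

theorem pvA_append (l : List Int) (y : Int) (hl : l ≠ []) :
    max_min_lista (l ++ [y]) = pvStep (max_min_lista l) y (l.length : Int) := by
  have hpos : 0 < l.length := List.length_pos_iff.mpr hl
  have hlen : 1 ≤ (l.length : Int) := by omega
  have hsplit : PySem.List.pyRange 1 (((l ++ [y]).length : Nat) : Int) 1
      = PySem.List.pyRange 1 (l.length : Int) 1 ++ [(l.length : Int)] := by
    have h : (((l ++ [y]).length : Nat) : Int) = (l.length : Int) + 1 := by simp
    rw [h, PySem.List.pyRange_one_succ_right hlen]
  have hget0 : PySem.List.pyGetD (l ++ [y]) 0 0 = PySem.List.pyGetD l 0 0 := by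
    cases l with
    | nil => exact absurd rfl hl
    | cons a s => simp [PySem.List.pyGetD_zero_cons]
  have hgetmid : ∀ i ∈ PySem.List.pyRange 1 (l.length : Int) 1,
      PySem.List.pyGetD (l ++ [y]) i 0 = PySem.List.pyGetD l i 0 := by
    intro i hi
    rw [PySem.List.mem_pyRange_one] at hi
    have hlt : i.toNat < l.length := by omega
    rw [PySem.List.pyGetD_eq_getElem (l ++ [y]) (i := i) 0 (by omega) (by simp; omega),
        PySem.List.pyGetD_eq_getElem l (i := i) 0 (by omega) (by omega)]
    simp [hlt]
  have hgetlast : PySem.List.pyGetD (l ++ [y]) (l.length : Int) 0 = y := by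
    rw [PySem.List.pyGetD_eq_getElem (l ++ [y]) (i := (l.length : Int)) 0 (by omega) (by simp)]
    simp
  unfold max_min_lista
  rw [hsplit, List.foldl_append, hget0]
  simp only [List.foldl_cons, List.foldl_nil, hgetlast]
  congr 1
  exact PySem.List.foldl_congr_mem _ _ _ _ (fun acc z hz => by rw [hgetmid z hz])

theorem pvAlt_cons_eq (x : Int) (t : List Int) :
    max_min_lista_alt (x :: t) =
      ((t.foldl max x), (((PySem.List.index? (x :: t) (t.foldl max x)).getD 0 : Nat) : Int),
       (t.foldl min x), (((PySem.List.index? (x :: t) (t.foldl min x)).getD 0 : Nat) : Int)) := by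
  unfold max_min_lista_alt
  rw [PySem.List.max?_id_cons, PySem.List.min?_id_cons]

theorem pvAlt_single (x : Int) : max_min_lista_alt [x] = (x, 0, x, 0) := by
  rw [pvAlt_cons_eq]
  simp

theorem pvAlt_append (x y : Int) (t : List Int) :
    max_min_lista_alt ((x :: t) ++ [y]) = pvStep (max_min_lista_alt (x :: t)) y (((x :: t).length : Nat) : Int) := by
  obtain ⟨M, hM⟩ : ∃ M, List.foldl max x t = M := ⟨_, rfl⟩
  obtain ⟨m, hm⟩ : ∃ m, List.foldl min x t = m := ⟨_, rfl⟩
  have hmaxq : PySem.List.max? (x :: t) (fun z => z) = some M := by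
    rw [PySem.List.max?_id_cons, hM]
  have hminq : PySem.List.min? (x :: t) (fun z => z) = some m := by
    rw [PySem.List.min?_id_cons, hm]
  have hMmem : M ∈ x :: t := PySem.List.max?_mem hmaxq
  have hmmem : m ∈ x :: t := PySem.List.min?_mem hminq
  have hMmax : ∀ z ∈ x :: t, z ≤ M := PySem.List.max?_isMax hmaxq
  have hmmin : ∀ z ∈ x :: t, m ≤ z := PySem.List.min?_isMin hminq
  have hmM : m ≤ M := hmmin M hMmem
  have hfold : (x :: t) ++ [y] = x :: (t ++ [y]) := rfl
  have h1 : List.foldl max x (t ++ [y]) = max M y := by rw [List.foldl_append, hM]; rfl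
  have h2 : List.foldl min x (t ++ [y]) = min m y := by rw [List.foldl_append, hm]; rfl
  rw [hfold, pvAlt_cons_eq, pvAlt_cons_eq, h1, h2, hM, hm, ← hfold]
  by_cases hy : y > M
  · have hyn : y ∉ x :: t := fun h => absurd (hMmax y h) (not_le.mpr hy)
    have hnm : ¬ y < m := not_lt.mpr (le_trans hmM (le_of_lt hy))
    rw [max_eq_right (le_of_lt hy), min_eq_left (le_trans hmM (le_of_lt hy)),
        PySem.List.index?_append_singleton_self (x :: t) y hyn,
        PySem.List.index?_append_of_mem _ hmmem]
    simp [pvStep, hy, hnm]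
  · have hyM : y ≤ M := not_lt.mp hy
    rw [max_eq_left hyM, PySem.List.index?_append_of_mem _ hMmem]
    by_cases hy2 : y < m
    · have hyn : y ∉ x :: t := fun h => absurd (hmmin y h) (not_le.mpr hy2)
      rw [min_eq_right (le_of_lt hy2), PySem.List.index?_append_singleton_self (x :: t) y hyn]
      simp [pvStep, hy, hy2]
    · have hym : m ≤ y := not_lt.mp hy2
      rw [min_eq_left hym, PySem.List.index?_append_of_mem _ hmmem]
      simp [pvStep, hy, hy2]

theorem pv_main : ∀ (l : List Int), l ≠ [] → max_min_lista l = max_min_lista_alt l := by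
  intro l
  induction l using List.reverseRecOn with
  | nil => intro h; exact absurd rfl h
  | append_singleton l y ih =>
    intro _
    cases l with
    | nil => simp only [List.nil_append]; rw [pvA_single, pvAlt_single]
    | cons a s =>
      rw [pvA_append (a :: s) y (by simp), pvAlt_append a y s, ih (by simp)]

-- ===== VERDICT (by name: the statement is the Claim_ definition above) =====
theorem max_min_lista_spec : Claim_equal_max_min_lista := by
  intro l _ hpre
  unfold Spec_max_min_lista
  exact pv_main l hpre
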